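-- pv_equiv track=rewrite | github.com/skywal1ker/python-assignments | HW5c_57.py | c_holes
-- ===== SOURCE A (Python) =====
-- def c_holes(s):
--     holes=["a","b","d","e","g","o","p","q","A", "B", "D", "O", "P", "Q", "R"]
--     u_holes = ["A", "B", "D", "O", "P", "Q", "R"]
--     c_holes = 0
--     c_u_holes = 0
--     for element in s:
--         if element in holes:
--             c_holes = c_holes + 1
--         if element in u_holes:
--             c_u_holes = c_u_holes + 1
--     no_holes = len(s) - c_holes
--     return c_holes,no_holes,c_u_holes
-- ===== SOURCE B (Python) =====
-- def c_holes(s):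
--     holes = "abdegopqABDOPQR"
--     u_holes = "ABDOPQR"
--     c_h = sum(s.count(c) for c in holes)
--     c_u = sum(s.count(c) for c in u_holes)
--     return c_h, len(s) - c_h, c_u
-- ===== Notes on version B (the rewrite author's own statement) =====
-- stated objective: faster
-- what changed: Instead of scanning s once per character with two list-membership tests, B iterates over the fixed hole alphabets and sums s.count(c) per hole letter, deriving no_holes as len(s) - c_holes.
import Mathlib
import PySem

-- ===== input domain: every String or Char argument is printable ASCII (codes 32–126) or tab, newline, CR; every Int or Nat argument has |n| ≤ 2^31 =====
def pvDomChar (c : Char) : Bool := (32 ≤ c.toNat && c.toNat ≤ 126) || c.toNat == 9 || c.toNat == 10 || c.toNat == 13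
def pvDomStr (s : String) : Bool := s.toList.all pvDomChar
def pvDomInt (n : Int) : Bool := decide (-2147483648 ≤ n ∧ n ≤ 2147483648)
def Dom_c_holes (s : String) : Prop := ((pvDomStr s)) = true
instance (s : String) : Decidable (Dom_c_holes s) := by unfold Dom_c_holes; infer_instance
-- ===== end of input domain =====

-- B replaces A's single scan of s (two membership tests per character) with per-letter
-- sums of s.count(c) over the fixed hole alphabets (faster by constant factor: C-level count).


-- ===== PORT A =====
-- A: one pass over s, two list-membership tests per character, pair accumulator.
def c_holes (s : String) : Int × Int × Int :=
  let holes : List Char := ['a','b','d','e','g','o','p','q','A','B','D','O','P','Q','R']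
  let u_holes : List Char := ['A','B','D','O','P','Q','R']
  let p : Int × Int := s.toList.foldl
    (fun (p : Int × Int) element =>
      let p1 := if element ∈ holes then (p.1 + 1, p.2) else p
      if element ∈ u_holes then (p1.1, p1.2 + 1) else p1)
    (0, 0)
  (p.1, (PySem.Str.len s : Int) - p.1, p.2)

-- ===== PORT B =====
-- B: iterate over the hole alphabets, summing s.count(c) per letter.
def c_holes_alt (s : String) : Int × Int × Int :=
  let holes : String := "abdegopqABDOPQR"
  let u_holes : String := "ABDOPQR"
  let c_h : Int := (holes.toList.map (fun c => (PySem.Str.count s (String.ofList [c]) : Int))).sum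
  let c_u : Int := (u_holes.toList.map (fun c => (PySem.Str.count s (String.ofList [c]) : Int))).sum
  (c_h, (PySem.Str.len s : Int) - c_h, c_u)

-- ===== PRECONDITION & SPEC =====
def Spec_c_holes (s : String) (out : Int × Int × Int) : Prop := out = c_holes_alt s
instance (s : String) (out : Int × Int × Int) : Decidable (Spec_c_holes s out) := by unfold Spec_c_holes; infer_instance

-- ===== CLAIM (what is proved, stated in full; the proofs are below) =====
def Claim_equal_c_holes : Prop := ∀ (s : String), Dom_c_holes s → Spec_c_holes s (c_holes s)

-- ===== LEMMAS AND PROOFS =====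

theorem chars_count_go_single (c : Char) (l : List Char) (fuel acc : Nat)
    (h : l.length ≤ fuel) :
    PySem.Chars.count.go [c] fuel l acc = acc + l.count c := by
  induction l generalizing fuel acc with
  | nil => cases fuel <;> simp [PySem.Chars.count.go]
  | cons a t ih =>
    cases fuel with
    | zero => simp at h
    | succ f =>
      simp only [PySem.Chars.count.go, List.isPrefixOf]
      by_cases hac : c = a
      · subst hac
        simp only [BEq.rfl, Bool.and_true, if_true]
        rw [List.length_singleton, List.drop_one, List.tail_cons,
          ih f (acc + 1) (by simp at h; omega)]
        simp
        omega
      · have hb : (c == a) = false := by simp [hac]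
        simp only [hb, Bool.false_and]
        rw [ih f acc (by simp at h; omega)]
        simp [Ne.symm hac]

theorem str_count_single (s : String) (c : Char) :
    PySem.Str.count s (String.ofList [c]) = s.toList.count c := by
  have h1 : PySem.Chars.count s.toList [c] = s.toList.count c := by
    unfold PySem.Chars.count
    rw [if_neg (by simp)]
    simpa using chars_count_go_single c s.toList s.toList.length 0 (le_refl _)
  simpa [PySem.Str.count] using h1

theorem sum_indicator (h : List Char) (hn : h.Nodup) (a : Char) :
    (h.map (fun c => if a = c then (1 : Int) else 0)).sum = if a ∈ h then 1 else 0 := by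
  induction h with
  | nil => simp
  | cons b hb ih =>
    rcases List.nodup_cons.mp hn with ⟨hbmem, hnd⟩
    by_cases hab : a = b
    · subst hab
      simp [ih hnd, hbmem]
    · simp [hab, ih hnd]

theorem sum_counts_eq_countP (h : List Char) (hn : h.Nodup) (l : List Char) :
    (h.map (fun c => (l.count c : Int))).sum = (l.countP (· ∈ h) : Int) := by
  induction l with
  | nil => simp
  | cons a t ih =>
    have hmap : (h.map (fun c => ((a :: t).count c : Int))).sum
        = (h.map (fun c => (t.count c : Int))).sum
          + (h.map (fun c => if a = c then (1 : Int) else 0)).sum := by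
      rw [← List.sum_map_add]
      refine congrArg List.sum (List.map_congr_left fun c _ => ?_)
      by_cases hac : a = c
      · subst hac
        simp
      · simp [hac]
    rw [hmap, ih, sum_indicator h hn a, List.countP_cons]
    by_cases hah : a ∈ h <;> simp [hah]

theorem foldAB (H U : List Char) (l : List Char) (a b : Int) :
    l.foldl (fun (p : Int × Int) element =>
      let p1 := if element ∈ H then (p.1 + 1, p.2) else p
      if element ∈ U then (p1.1, p1.2 + 1) else p1) (a, b)
    = (a + (l.countP (· ∈ H) : Int), b + (l.countP (· ∈ U) : Int)) := by
  induction l generalizing a b with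
  | nil => simp
  | cons c t ih =>
    simp only [List.foldl_cons, List.countP_cons]
    by_cases h1 : c ∈ H <;> by_cases h2 : c ∈ U <;>
        simp only [h1, h2, if_true, if_false, decide_true, decide_false] <;>
        rw [ih] <;> push_cast <;> simp only [Prod.mk.injEq] <;> constructor <;> ring

-- B's per-letter sum over an alphabet h equals A's countP of membership in h.
theorem alt_sum_eq_countP (s : String) (h : List Char) (hn : h.Nodup) :
    (h.map (fun c => (PySem.Str.count s (String.ofList [c]) : Int))).sum
      = (s.toList.countP (· ∈ h) : Int) := by
  have e : ∀ c ∈ h, ((PySem.Str.count s (String.ofList [c]) : Int)) = ((s.toList.count c : Nat) : Int) := by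
    intro c _
    rw [str_count_single s c]
  rw [congrArg List.sum (List.map_congr_left e)]
  exact sum_counts_eq_countP h hn s.toList

-- ===== VERDICT (by name: the statement is the Claim_ definition above) =====
theorem c_holes_spec : Claim_equal_c_holes := by
  intro s _
  unfold Spec_c_holes c_holes c_holes_alt
  simp only
  rw [foldAB]
  have hH : ("abdegopqABDOPQR" : String).toList
      = ['a','b','d','e','g','o','p','q','A','B','D','O','P','Q','R'] := by decide
  have hU : ("ABDOPQR" : String).toList = ['A','B','D','O','P','Q','R'] := by decide
  rw [hH, hU, alt_sum_eq_countP s _ (by decide), alt_sum_eq_countP s _ (by decide)]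
  simp
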